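-- pv_equiv track=rewrite | github.com/MilaDog/Codyssi | src/2025/day08.py | reduce_line
-- ===== SOURCE A (Python) =====
-- def reduce_line(line: str, use_hyphen: bool = True) -> str:
--     """Reduce the line as much as possible."""
--     has_changed: bool = False
--
--     indx_to_remove: set[int] = set()
--     for i in range(len(line) - 1):
--         curr, nxt = line[i], line[i + 1]
--
--         if i in indx_to_remove:
--             continue
--
--         if (curr.isdigit() and (nxt.isalpha() or (nxt == "-" and use_hyphen))) or (
--             nxt.isdigit() and (curr.isalpha() or (curr == "-" and use_hyphen))
--         ):
--             has_changed = True
--             indx_to_remove.add(i)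
--             indx_to_remove.add(i + 1)
--
--     if has_changed:
--         return reduce_line(
--             line="".join(x for i, x in enumerate(line) if i not in indx_to_remove), use_hyphen=use_hyphen
--         )
--     return line
-- ===== SOURCE B (Python) =====
-- def reduce_line(line: str, use_hyphen: bool = True) -> str:
--     """Reduce the line as much as possible."""
--
--     def removable(a: str, b: str) -> bool:
--         return (a.isdigit() and (b.isalpha() or (b == "-" and use_hyphen))) or (
--             b.isdigit() and (a.isalpha() or (a == "-" and use_hyphen))
--         )
--
--     s = list(line)
--     while True:
--         # Split into maximal runs in which every adjacent pair is removable.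
--         runs = []
--         for c in s:
--             if runs and removable(runs[-1][-1], c):
--                 runs[-1].append(c)
--             else:
--                 runs.append([c])
--         if all(len(r) == 1 for r in runs):
--             return "".join(s)
--         # One cancellation pass pairs up each run from the left, so only the
--         # last character of each odd-length run survives it.
--         s = [r[-1] for r in runs if len(r) % 2 == 1]
-- ===== Notes on version B (the rewrite author's own statement) =====
-- stated objective: alternative
-- what changed: Each cancellation pass is computed by splitting the string into maximal runs of removable-adjacent characters and keeping only the last character of each odd-length run, instead of A's index-marking scan with a removal set, recursion replaced by an iterative loop.
import Mathlib
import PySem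

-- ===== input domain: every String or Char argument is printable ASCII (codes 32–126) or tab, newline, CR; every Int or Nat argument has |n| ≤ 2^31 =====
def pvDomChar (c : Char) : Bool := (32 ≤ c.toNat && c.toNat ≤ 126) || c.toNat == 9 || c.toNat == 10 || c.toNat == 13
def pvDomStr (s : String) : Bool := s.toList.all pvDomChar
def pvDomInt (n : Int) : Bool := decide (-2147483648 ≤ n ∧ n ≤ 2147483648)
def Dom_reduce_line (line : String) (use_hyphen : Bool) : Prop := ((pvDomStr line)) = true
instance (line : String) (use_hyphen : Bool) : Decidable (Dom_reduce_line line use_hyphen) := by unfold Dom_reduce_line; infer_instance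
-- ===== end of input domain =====

-- B re-implements each cancellation pass by maximal-run splitting and parity instead of
-- A's index-marking scan, and iterates with a loop instead of recursion; same complexity.

-- ===== PORT A =====
-- helper: the body of A's `for i in range(len(line) - 1)` loop (state = (has_changed, indx_to_remove))
def stepA (use_hyphen : Bool) (chars : List Char) (s : Bool × PySem.Set Int) (i : Int) :
    Bool × PySem.Set Int :=
  let curr := PySem.List.pyGetD chars i ' '
  let nxt := PySem.List.pyGetD chars (i + 1) ' '
  if PySem.Set.contains s.2 i then s
  else if (PySem.Chars.isdigit curr && (PySem.Chars.isalpha nxt || (nxt == '-' && use_hyphen))) ||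
          (PySem.Chars.isdigit nxt && (PySem.Chars.isalpha curr || (curr == '-' && use_hyphen))) then
    (true, PySem.Set.add (PySem.Set.add s.2 i) (i + 1))
  else s

def foldA (use_hyphen : Bool) (chars : List Char) : Bool × PySem.Set Int :=
  (PySem.List.pyRange 0 ((chars.length : Int) - 1) 1).foldl (stepA use_hyphen chars)
    (false, PySem.Set.empty)

-- termination lemma for A's recursion: if has_changed then the removal set holds a valid index
theorem foldA_witness (use_hyphen : Bool) (chars : List Char)
    (h : (foldA use_hyphen chars).1 = true) :
    ∃ j : Int, PySem.Set.contains (foldA use_hyphen chars).2 j = true ∧ 0 ≤ j ∧ j < chars.length := by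
  have gen : ∀ (l : List Int) (s : Bool × PySem.Set Int),
      (∀ i ∈ l, 0 ≤ i ∧ i < (chars.length : Int)) →
      (s.1 = true → ∃ j : Int, PySem.Set.contains s.2 j = true ∧ 0 ≤ j ∧ j < chars.length) →
      ((l.foldl (stepA use_hyphen chars) s).1 = true →
        ∃ j : Int, PySem.Set.contains (l.foldl (stepA use_hyphen chars) s).2 j = true ∧
          0 ≤ j ∧ j < chars.length) := by
    intro l
    induction l with
    | nil => intro s _ hs; simpa using hs
    | cons i l ih =>
      intro s hb hs
      simp only [List.foldl_cons]
      refine ih (stepA use_hyphen chars s i) (fun x hx => hb x (by simp [hx])) ?_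
      intro ht
      simp only [stepA] at ht ⊢
      by_cases hcon : PySem.Set.contains s.2 i = true
      · rw [if_pos hcon] at ht ⊢
        exact hs ht
      · rw [if_neg hcon] at ht ⊢
        split at ht
        · rename_i hrem
          rw [if_pos hrem]
          refine ⟨i, ?_, (hb i (by simp)).1, (hb i (by simp)).2⟩
          exact List.contains_iff_mem.mpr
            ((PySem.Set.mem_add _ _ _).mpr (Or.inl ((PySem.Set.mem_add _ _ _).mpr (Or.inr rfl))))
        · rename_i hrem
          rw [if_neg hrem]
          exact hs ht
  exact gen (PySem.List.pyRange 0 ((chars.length : Int) - 1) 1) (false, PySem.Set.empty)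
    (fun i hi => by
      have := PySem.List.mem_pyRange_one.mp hi
      exact ⟨this.1, by omega⟩)
    (by intro hfalse; simp at hfalse) h

-- termination lemma for A's recursion: filtering out a present valid index shortens the string
theorem keepA_lt (chars : List Char) (st : PySem.Set Int) (j : Int)
    (hj : PySem.Set.contains st j = true) (h0 : 0 ≤ j) (hl : j < chars.length) :
    (((PySem.List.enumerate chars 0).filter
        (fun p => !(PySem.Set.contains st p.1))).map (·.2)).length < chars.length := by
  have hk : j.toNat < chars.length := by omega
  have hmem : ((j : Int), chars[j.toNat]) ∈ PySem.List.enumerate chars 0 := by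
    rw [PySem.List.mem_enumerate_iff]
    exact ⟨j.toNat, hk, by simp [Int.toNat_of_nonneg h0]⟩
  have hflt : ((PySem.List.enumerate chars 0).filter
      (fun p => !(PySem.Set.contains st p.1))).length <
      (PySem.List.enumerate chars 0).length :=
    List.length_filter_lt_length_iff_exists.mpr
      ⟨_, hmem, by simp; exact List.contains_iff_mem.mp hj⟩
  simpa [PySem.List.length_enumerate] using hflt

def reduce_line (line : String) (use_hyphen : Bool) : String :=
  let chars := line.toList
  let st := foldA use_hyphen chars
  if hch : st.1 = true then
    reduce_line (String.ofList (((PySem.List.enumerate chars 0).filter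
        (fun p => !(PySem.Set.contains st.2 p.1))).map (·.2))) use_hyphen
  else line
termination_by line.toList.length
decreasing_by
  simp only [String.toList_ofList]
  obtain ⟨j, hj, h0, hl⟩ := foldA_witness use_hyphen line.toList hch
  exact keepA_lt line.toList _ j hj h0 hl

-- ===== PORT B =====
-- helper: Source B's local `removable(a, b)`
def removableB (use_hyphen : Bool) (a b : Char) : Bool :=
  (PySem.Chars.isdigit a && (PySem.Chars.isalpha b || (b == '-' && use_hyphen))) ||
  (PySem.Chars.isdigit b && (PySem.Chars.isalpha a || (a == '-' && use_hyphen)))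

-- helper: the body of Source B's `for c in s` run-building loop
def stepB (use_hyphen : Bool) (runs : List (List Char)) (c : Char) : List (List Char) :=
  if !runs.isEmpty &&
      removableB use_hyphen (PySem.List.pyGetD (PySem.List.pyGetD runs (-1) []) (-1) ' ') c then
    runs.dropLast ++ [PySem.List.pyGetD runs (-1) [] ++ [c]]
  else runs ++ [[c]]

-- proof-side view of the run-building loop (used for B's termination and the equivalence)
def glue (use_hyphen : Bool) (r : List Char) : List Char → List (List Char)
  | [] => [r]
  | c :: t =>
    if removableB use_hyphen (PySem.List.pyGetD r (-1) ' ') c then glue use_hyphen (r ++ [c]) t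
    else r :: glue use_hyphen [c] t

theorem glue_flatten (use_hyphen : Bool) :
    ∀ (t r : List Char), (glue use_hyphen r t).flatten = r ++ t := by
  intro t
  induction t with
  | nil => intro r; simp [glue]
  | cons c t ih =>
    intro r
    simp only [glue]
    split
    · rw [ih (r ++ [c])]; simp
    · simp only [List.flatten_cons, ih [c]]; simp

theorem glue_forall_ne (use_hyphen : Bool) :
    ∀ (t r : List Char), r ≠ [] → ∀ x ∈ glue use_hyphen r t, x ≠ [] := by
  intro t
  induction t with
  | nil => intro r hr x hx; simp [glue] at hx; subst hx; exact hr
  | cons c t ih =>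
    intro r hr x hx
    simp only [glue] at hx
    split at hx
    · exact ih (r ++ [c]) (by simp) x hx
    · rcases List.mem_cons.mp hx with h1 | h2
      · subst h1; exact hr
      · exact ih [c] (by simp) x h2

theorem foldl_stepB (use_hyphen : Bool) :
    ∀ (t : List Char) (R₀ : List (List Char)) (r : List Char),
      t.foldl (stepB use_hyphen) (R₀ ++ [r]) = R₀ ++ glue use_hyphen r t := by
  intro t
  induction t with
  | nil => intro R₀ r; simp [glue]
  | cons c t ih =>
    intro R₀ r
    simp only [List.foldl_cons]
    by_cases hc : removableB use_hyphen (PySem.List.pyGetD r (-1) ' ') c = true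
    · have hs : stepB use_hyphen (R₀ ++ [r]) c = R₀ ++ [r ++ [c]] := by
        simp [stepB, PySem.List.pyGetD_neg_one_append_singleton, hc]
      rw [hs, ih R₀ (r ++ [c])]
      simp [glue, hc]
    · have hs : stepB use_hyphen (R₀ ++ [r]) c = (R₀ ++ [r]) ++ [[c]] := by
        simp [stepB, PySem.List.pyGetD_neg_one_append_singleton, hc]
      rw [hs, ih (R₀ ++ [r]) [c]]
      simp [glue, hc]

theorem runs_eq (use_hyphen : Bool) (c : Char) (t : List Char) :
    (c :: t).foldl (stepB use_hyphen) [] = glue use_hyphen [c] t := by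
  simp only [List.foldl_cons]
  rw [show stepB use_hyphen [] c = [] ++ [[c]] from by simp [stepB]]
  simpa using foldl_stepB use_hyphen t [] [c]

theorem count_le (f : List Char → Char) :
    ∀ (runs : List (List Char)), (∀ x ∈ runs, x ≠ []) →
      ((runs.filter (fun r => r.length % 2 == 1)).map f).length ≤ runs.flatten.length ∧
      ((∃ x ∈ runs, x.length ≠ 1) →
        ((runs.filter (fun r => r.length % 2 == 1)).map f).length < runs.flatten.length) := by
  intro runs
  induction runs with
  | nil => simp
  | cons r rs ih =>
    intro hne
    have hr1 : 1 ≤ r.length := List.length_pos_of_ne_nil (hne r (by simp))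
    obtain ⟨ih1, ih2⟩ := ih (fun x hx => hne x (by simp [hx]))
    by_cases hp : (r.length % 2 == 1) = true
    · refine ⟨?_, ?_⟩
      · simp only [List.filter_cons, hp, if_true, List.map_cons, List.length_cons,
          List.flatten_cons, List.length_append]
        omega
      · rintro ⟨x, hx, hxl⟩
        simp only [List.filter_cons, hp, if_true, List.map_cons, List.length_cons,
          List.flatten_cons, List.length_append]
        rcases List.mem_cons.mp hx with h1 | h2
        · subst h1; omega
        · have := ih2 ⟨x, h2, hxl⟩; omega
    · simp only [Bool.not_eq_true] at hp
      refine ⟨?_, ?_⟩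
      · simp only [List.filter_cons, hp, if_false, Bool.false_eq_true,
          List.flatten_cons, List.length_append]
        omega
      · rintro ⟨x, hx, hxl⟩
        simp only [List.filter_cons, hp, if_false, Bool.false_eq_true,
          List.flatten_cons, List.length_append]
        rcases List.mem_cons.mp hx with h1 | h2
        · subst h1; omega
        · have := ih2 ⟨x, h2, hxl⟩; omega

-- termination lemma for Source B's while loop
theorem loopB_dec (use_hyphen : Bool) (s : List Char)
    (h : ¬ (s.foldl (stepB use_hyphen) []).all (fun r => r.length == 1) = true) :
    (((s.foldl (stepB use_hyphen) []).filter (fun r => r.length % 2 == 1)).map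
      (fun r => PySem.List.pyGetD r (-1) ' ')).length < s.length := by
  cases s with
  | nil => simp at h
  | cons c t =>
    rw [runs_eq] at h ⊢
    have hex : ∃ x ∈ glue use_hyphen [c] t, x.length ≠ 1 := by
      simpa [List.all_eq_true] using h
    have hlt := (count_le (fun r => PySem.List.pyGetD r (-1) ' ') (glue use_hyphen [c] t)
      (glue_forall_ne use_hyphen t [c] (by simp))).2 hex
    rw [glue_flatten] at hlt
    simpa using hlt

def loopB (use_hyphen : Bool) (s : List Char) : List Char :=
  -- runs = s.foldl (stepB use_hyphen) []  (Source B's `runs` variable, inlined)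
  if (s.foldl (stepB use_hyphen) []).all (fun r => r.length == 1) then s
  else
    loopB use_hyphen
      (((s.foldl (stepB use_hyphen) []).filter (fun r => r.length % 2 == 1)).map
        (fun r => PySem.List.pyGetD r (-1) ' '))
termination_by s.length
decreasing_by
  rename_i hall
  simp only [List.foldl_attach] at hall ⊢
  exact loopB_dec use_hyphen s hall

def reduce_line_alt (line : String) (use_hyphen : Bool) : String :=
  String.ofList (loopB use_hyphen line.toList)

-- ===== PRECONDITION & SPEC =====
def Spec_reduce_line (line : String) (use_hyphen : Bool) (out : String) : Prop := out = reduce_line_alt line use_hyphen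
instance (line : String) (use_hyphen : Bool) (out : String) : Decidable (Spec_reduce_line line use_hyphen out) := by unfold Spec_reduce_line; infer_instance

-- ===== CLAIM (what is proved, stated in full; the proofs are below) =====
def Claim_equal_reduce_line : Prop := ∀ (line : String) (use_hyphen : Bool), Dom_reduce_line line use_hyphen → Spec_reduce_line line use_hyphen (reduce_line line use_hyphen)

-- ===== LEMMAS AND PROOFS =====

-- one greedy cancellation pass, as a recursion (the common reference point of both ports)
def passL (h : Bool) : List Char → List Char
  | [] => []
  | [a] => [a]
  | a :: b :: t => if removableB h a b then passL h t else a :: passL h (b :: t)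

-- the indices A's pass removes, relative to the start of the list
def rmvA (h : Bool) : List Char → List Nat
  | [] => []
  | [_] => []
  | a :: b :: t =>
    if removableB h a b then 0 :: 1 :: (rmvA h t).map (· + 2)
    else (rmvA h (b :: t)).map (· + 1)

-- A's loop body re-expressed over (index, (curr, nxt)) triples
def stepZ (h : Bool) (s : Bool × PySem.Set Int) (p : Int × (Char × Char)) : Bool × PySem.Set Int :=
  if PySem.Set.contains s.2 p.1 then s
  else if removableB h p.2.1 p.2.2 then (true, PySem.Set.add (PySem.Set.add s.2 p.1) (p.1 + 1))
  else s

theorem shift_map (X : List Nat) (k : Int) (m : Nat) :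
    (X.map (fun j => j + m)).map (fun (j : Nat) => k + (j : Int)) =
      X.map (fun (j : Nat) => (k + (m : Int)) + (j : Int)) := by
  rw [List.map_map]
  simp only [Function.comp_def]
  apply List.map_congr_left
  intro j _
  push_cast; ring

theorem foldA_eq_foldZ (h : Bool) (chars : List Char) :
    foldA h chars =
      (PySem.List.enumerate (chars.zip chars.tail) 0).foldl (stepZ h) (false, PySem.Set.empty) := by
  unfold foldA
  have hlist : PySem.List.enumerate (chars.zip chars.tail) 0 =
      (PySem.List.pyRange 0 ((chars.length : Int) - 1) 1).map
        (fun i => (i, (PySem.List.pyGetD chars i ' ', PySem.List.pyGetD chars (i + 1) ' '))) := by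
    apply List.ext_getElem
    · simp only [PySem.List.length_enumerate, List.length_zip, List.length_tail,
        List.length_map, PySem.List.length_pyRange_one]
      omega
    · intro k hk1 hk2
      have hkz : k < (chars.zip chars.tail).length := by
        simpa [PySem.List.length_enumerate] using hk1
      have hkn : k + 1 < chars.length := by
        simp only [List.length_zip, List.length_tail] at hkz; omega
      rw [PySem.List.getElem_enumerate (chars.zip chars.tail) 0 k hk1]
      rw [List.getElem_map]
      rw [PySem.List.getElem_pyRange_one 0 ((chars.length : Int) - 1) k
        (by simpa using hk2)]
      simp only [List.getElem_zip, List.getElem_tail]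
      have e1 : PySem.List.pyGetD chars ((k : Nat) : Int) ' ' = chars[k] := by
        rw [PySem.List.pyGetD_natCast]
        exact List.getD_eq_getElem chars ' ' (by omega)
      have e2 : PySem.List.pyGetD chars ((k : Int) + 1) ' ' = chars[k + 1] := by
        rw [show ((k : Int) + 1) = (((k + 1 : Nat)) : Int) from by push_cast; ring,
          PySem.List.pyGetD_natCast]
        exact List.getD_eq_getElem chars ' ' hkn
      simp [e1, e2]
  rw [hlist, List.foldl_map]
  rfl

theorem mainA (h : Bool) :
    ∀ (N : Nat) (l : List Char) (k : Int) (b0 : Bool) (S0 : PySem.Set Int),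
      l.length ≤ N → (∀ j ∈ S0, j < k) →
      (PySem.List.enumerate (l.zip l.tail) k).foldl (stepZ h) (b0, S0) =
        (b0 || !decide (rmvA h l = []), S0 ++ (rmvA h l).map (fun (j : Nat) => k + (j : Int))) := by
  intro N
  induction N with
  | zero =>
    intro l k b0 S0 hN hS
    rw [List.length_eq_zero_iff.mp (Nat.le_zero.mp hN)]
    simp [rmvA, PySem.List.enumerate_nil]
  | succ N ihN =>
    intro l k b0 S0 hN hS
    match l with
    | [] => simp [rmvA, PySem.List.enumerate_nil]
    | [a] => simp [rmvA, PySem.List.enumerate_nil]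
    | a :: b :: t =>
      have hzip : ((a :: b :: t).zip (a :: b :: t).tail) =
          (a, b) :: ((b :: t).zip (b :: t).tail) := by cases t <;> rfl
      rw [hzip, PySem.List.enumerate_cons, List.foldl_cons]
      have hkS0 : PySem.Set.contains S0 k = false := by
        rw [Bool.eq_false_iff]
        intro hc
        exact absurd (hS k (List.contains_iff_mem.mp hc)) (lt_irrefl k)
      by_cases hab : removableB h a b = true
      · have h1 : PySem.Set.add S0 k = S0 ++ [k] := by
          simp only [PySem.Set.add, hkS0, Bool.false_eq_true, if_false]
        have h2 : PySem.Set.add (PySem.Set.add S0 k) (k + 1) = S0 ++ [k, k + 1] := by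
          rw [h1]
          have hc2 : PySem.Set.contains (S0 ++ [k]) (k + 1) = false := by
            rw [Bool.eq_false_iff]
            intro hc
            rcases List.mem_append.mp (List.contains_iff_mem.mp hc) with hm1 | hm2
            · have := hS _ hm1; omega
            · simp at hm2
          simp only [PySem.Set.add, hc2, Bool.false_eq_true, if_false]
          simp

        have hstep : stepZ h (b0, S0) (k, (a, b)) = (true, S0 ++ [k, k + 1]) := by
          simp only [stepZ, hkS0, Bool.false_eq_true, if_false, hab, if_true, h2]
        rw [hstep]
        cases t with
        | nil =>
          simp only [List.tail_cons, List.zip_nil_right, PySem.List.enumerate_nil,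
            List.foldl_nil]
          simp [rmvA, hab]
        | cons c t' =>
          have hzip2 : ((b :: c :: t').zip (b :: c :: t').tail) =
              (b, c) :: ((c :: t').zip (c :: t').tail) := rfl
          rw [hzip2, PySem.List.enumerate_cons, List.foldl_cons]
          have hsk : stepZ h (true, S0 ++ [k, k + 1]) (k + 1, (b, c)) = (true, S0 ++ [k, k + 1]) := by
            have hc : PySem.Set.contains (S0 ++ [k, k + 1]) (k + 1) = true :=
              List.contains_iff_mem.mpr (List.mem_append.mpr (Or.inr (by simp)))
            simp only [stepZ, hc, if_true]
          rw [hsk]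
          rw [show (k : Int) + 1 + 1 = k + 2 from by ring]
          rw [ihN (c :: t') (k + 2) true (S0 ++ [k, k + 1]) (by simp at hN ⊢; omega)
            (by
              intro j hj
              rcases List.mem_append.mp hj with h1 | h2
              · have := hS j h1; omega
              · simp at h2; rcases h2 with rfl | rfl <;> omega)]
          simp only [rmvA, hab, if_true, Prod.mk.injEq]
          refine ⟨by simp, ?_⟩
          simp only [List.map_cons, shift_map]
          simp [List.append_assoc]
      · have hstep : stepZ h (b0, S0) (k, (a, b)) = (b0, S0) := by
          simp only [stepZ, hkS0, Bool.false_eq_true, if_false, hab]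
        rw [hstep]
        rw [ihN (b :: t) (k + 1) b0 S0 (by simp at hN ⊢; omega)
          (fun j hj => by have := hS j hj; omega)]
        simp only [rmvA, hab, Bool.false_eq_true, if_false, Prod.mk.injEq]
        refine ⟨by simp [List.map_eq_nil_iff], ?_⟩
        rw [shift_map]
        simp

theorem filterA (h : Bool) :
    ∀ (N : Nat) (l : List Char) (k : Int) (S0 : PySem.Set Int),
      l.length ≤ N → (∀ j ∈ S0, j < k) →
      ((PySem.List.enumerate l k).filter
          (fun p => !(PySem.Set.contains (S0 ++ (rmvA h l).map (fun (j : Nat) => k + (j : Int))) p.1))).map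
        (·.2) = passL h l := by
  intro N
  induction N with
  | zero =>
    intro l k S0 hN hS
    rw [List.length_eq_zero_iff.mp (Nat.le_zero.mp hN)]
    simp [rmvA, passL, PySem.List.enumerate_nil]
  | succ N ihN =>
    intro l k S0 hN hS
    have hkS0 : ∀ (T : List Int), (∀ j ∈ T, j < k ∨ k < j) → PySem.Set.contains T k = false := by
      intro T hT
      rw [Bool.eq_false_iff]
      intro hc
      rcases hT k (List.contains_iff_mem.mp hc) with hlt | hlt <;> omega
    match l with
    | [] => simp [rmvA, passL, PySem.List.enumerate_nil]
    | [a] =>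
      rw [PySem.List.enumerate_cons, PySem.List.enumerate_nil]
      have hc : PySem.Set.contains (S0 ++ (rmvA h [a]).map (fun (j : Nat) => k + (j : Int))) k = false := by
        apply hkS0
        intro j hj
        rcases List.mem_append.mp hj with h1 | h2
        · exact Or.inl (hS j h1)
        · simp [rmvA] at h2
      rw [List.filter_cons]
      simp only [hc, Bool.not_false, if_true]
      simp [passL]
    | a :: b :: t =>
      rw [PySem.List.enumerate_cons]
      by_cases hab : removableB h a b = true
      · rw [PySem.List.enumerate_cons]
        simp only [rmvA, hab, if_true]
        have hset : S0 ++ ((0 :: 1 :: (rmvA h t).map (· + 2)).map (fun (j : Nat) => k + (j : Int))) =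
            (S0 ++ [k, k + 1]) ++ (rmvA h t).map (fun (j : Nat) => (k + 2) + (j : Int)) := by
          simp only [List.map_cons, shift_map]
          simp [List.append_assoc]
        rw [hset]
        have hck : PySem.Set.contains ((S0 ++ [k, k + 1]) ++ (rmvA h t).map (fun (j : Nat) => (k + 2) + (j : Int))) k = true := by
          apply List.contains_iff_mem.mpr
          exact List.mem_append.mpr (Or.inl (List.mem_append.mpr (Or.inr (by simp))))
        have hck1 : PySem.Set.contains ((S0 ++ [k, k + 1]) ++ (rmvA h t).map (fun (j : Nat) => (k + 2) + (j : Int))) (k + 1) = true := by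
          apply List.contains_iff_mem.mpr
          exact List.mem_append.mpr (Or.inl (List.mem_append.mpr (Or.inr (by simp))))
        rw [List.filter_cons, List.filter_cons]
        simp only [hck, hck1, Bool.not_true, Bool.false_eq_true, if_false]
        rw [show (k : Int) + 1 + 1 = k + 2 from by ring]
        rw [ihN t (k + 2) (S0 ++ [k, k + 1]) (by simp at hN ⊢; omega)
          (by
            intro j hj
            rcases List.mem_append.mp hj with h1 | h2
            · have := hS j h1; omega
            · simp at h2; rcases h2 with rfl | rfl <;> omega)]
        simp [passL, hab]
      · simp only [rmvA, hab, Bool.false_eq_true, if_false]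
        have hset : S0 ++ (((rmvA h (b :: t)).map (· + 1)).map (fun (j : Nat) => k + (j : Int))) =
            S0 ++ (rmvA h (b :: t)).map (fun (j : Nat) => (k + 1) + (j : Int)) := by
          rw [shift_map]
          simp
        rw [hset]
        have hc : PySem.Set.contains (S0 ++ (rmvA h (b :: t)).map (fun (j : Nat) => (k + 1) + (j : Int))) k = false := by
          apply hkS0
          intro j hj
          rcases List.mem_append.mp hj with h1 | h2
          · exact Or.inl (hS j h1)
          · right
            obtain ⟨x, _, rfl⟩ := List.mem_map.mp h2
            omega
        rw [List.filter_cons]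
        simp only [hc, Bool.not_false, if_true]
        rw [List.map_cons]
        rw [ihN (b :: t) (k + 1) S0 (by simp at hN ⊢; omega)
          (fun j hj => by have := hS j hj; omega)]
        simp [passL, hab]

theorem A_step (line : String) (h : Bool) :
    reduce_line line h =
      if rmvA h line.toList = [] then line
      else reduce_line (String.ofList (passL h line.toList)) h := by
  have hf := foldA_eq_foldZ h line.toList
  rw [mainA h line.toList.length line.toList 0 false PySem.Set.empty le_rfl (by simp)] at hf
  by_cases hr : rmvA h line.toList = []
  · rw [if_pos hr]
    have h1 : (foldA h line.toList).1 = false := by rw [hf]; simp [hr]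
    rw [reduce_line]
    simp [h1]
  · have h1 : (foldA h line.toList).1 = true := by rw [hf]; simp [hr]
    rw [if_neg hr, reduce_line]
    simp only [h1, dite_true]
    have h2 : (foldA h line.toList).2 =
        PySem.Set.empty ++ (rmvA h line.toList).map (fun (j : Nat) => (0 : Int) + (j : Int)) := by
      rw [hf]
    rw [h2]
    exact congrArg (fun z => reduce_line z h) (congrArg String.ofList
      (filterA h line.toList.length line.toList 0 PySem.Set.empty le_rfl (by simp)))

theorem glue_ne_nil (h : Bool) : ∀ (t r : List Char), glue h r t ≠ [] := by
  intro t
  induction t with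
  | nil => intro r; simp [glue]
  | cons c t ih =>
    intro r
    simp only [glue]
    split
    · exact ih (r ++ [c])
    · simp

theorem glue_prefix (h : Bool) :
    ∀ (t p r : List Char), r ≠ [] →
      glue h (p ++ r) t = (p ++ (glue h r t).headD []) :: (glue h r t).tail := by
  intro t
  induction t with
  | nil => intro p r hr; simp [glue]
  | cons c t ih =>
    intro p r hr
    have hget : PySem.List.pyGetD (p ++ r) (-1) ' ' = PySem.List.pyGetD r (-1) ' ' := by
      have h1 := PySem.List.pyGetD_neg_one (p ++ r) ' ' (by simp [hr])
      have h2 := PySem.List.pyGetD_neg_one r ' ' hr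
      rw [h1, h2]; exact List.getLast_append_of_ne_nil _ hr
    simp only [glue, hget]
    by_cases hc : removableB h (PySem.List.pyGetD r (-1) ' ') c = true
    · simp only [hc, if_true]
      rw [show (p ++ r) ++ [c] = p ++ (r ++ [c]) from by simp]
      exact ih p (r ++ [c]) (by simp)
    · simp [hc]

-- the surviving characters of one pass, computed from the runs
def outG (h : Bool) (r t : List Char) : List Char :=
  ((glue h r t).filter (fun x => x.length % 2 == 1)).map (fun x => PySem.List.pyGetD x (-1) ' ')

theorem par2 (g p : List Char) (hp : p.length = 2) :
    (((p ++ g).length) % 2 == 1) = ((g.length % 2) == 1) := by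
  rw [show (p ++ g).length = g.length + 2 from by simp [hp, Nat.add_comm], Nat.add_mod_right]

theorem last2 (g p : List Char) (hg : g ≠ []) :
    PySem.List.pyGetD (p ++ g) (-1) ' ' = PySem.List.pyGetD g (-1) ' ' := by
  have h1 := PySem.List.pyGetD_neg_one (p ++ g) ' ' (by simp [hg])
  have h2 := PySem.List.pyGetD_neg_one g ' ' hg
  rw [h1, h2]; exact List.getLast_append_of_ne_nil _ hg

theorem keyB (h : Bool) :
    ∀ (N : Nat) (t r : List Char), 2 * t.length + r.length ≤ N → r ≠ [] →
      List.IsChain (fun a b => removableB h a b = true) r →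
      passL h (r ++ t) = outG h r t := by
  intro N
  induction N using Nat.strong_induction_on with
  | _ N ih =>
  intro t r hN hr hch
  obtain ⟨a, r1, rfl⟩ := List.exists_cons_of_ne_nil hr
  have hga : PySem.List.pyGetD [a] (-1) ' ' = a := by
    rw [PySem.List.pyGetD_neg_one [a] ' ' (by simp)]; rfl
  cases r1 with
  | nil =>
    cases t with
    | nil => simp [outG, glue, passL, hga]
    | cons c t' =>
      have hlen : 2 * t'.length + 3 ≤ N := by simp at hN; omega
      by_cases hac : removableB h a c = true
      · have hIH := ih (2 * t'.length + 2) (by omega) t' [a, c] le_rfl (by simp)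
          (List.isChain_cons_cons.mpr ⟨hac, List.IsChain.singleton c⟩)
        have hL : passL h ([a] ++ c :: t') = passL h ([a, c] ++ t') := rfl
        rw [hL, hIH]
        simp only [outG, glue, hga]
        simp [hac]
      · have hIH := ih (2 * t'.length + 1) (by omega) t' [c] le_rfl (by simp)
          (List.IsChain.singleton c)
        simp only [List.singleton_append] at hIH ⊢
        have hL : passL h (a :: c :: t') = a :: passL h (c :: t') := by simp [passL, hac]
        rw [hL, hIH]
        simp only [outG, glue, hga, hac]
        simp [hga]
  | cons b r2 =>
    obtain ⟨hab, hch2⟩ := List.isChain_cons_cons.mp hch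
    cases r2 with
    | nil =>
      have hgb : PySem.List.pyGetD [a, b] (-1) ' ' = b := by
        rw [PySem.List.pyGetD_neg_one [a, b] ' ' (by simp)]; rfl
      cases t with
      | nil => simp [outG, glue, passL, hab]
      | cons c t' =>
        have hlen : 2 * t'.length + 4 ≤ N := by simp at hN; omega
        have hL : passL h ([a, b] ++ c :: t') = passL h (c :: t') := by simp [passL, hab]
        by_cases hbc : removableB h b c = true
        · have hIH := ih (2 * t'.length + 3) (by omega) t' [a, b, c] le_rfl (by simp)
            (List.isChain_cons_cons.mpr ⟨hab,
              List.isChain_cons_cons.mpr ⟨hbc, List.IsChain.singleton c⟩⟩)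
          have hL2 : passL h ([a, b, c] ++ t') = passL h (c :: t') := by simp [passL, hab]
          rw [hL, ← hL2, hIH]
          simp only [outG, glue, hgb, hbc]
          simp
        · have hIH := ih (2 * t'.length + 1) (by omega) t' [c] le_rfl (by simp)
            (List.IsChain.singleton c)
          simp only [List.singleton_append] at hIH
          rw [hL, hIH]
          simp only [outG, glue, hgb, hbc]
          simp
    | cons d r3 =>
      have hch3 : List.IsChain (fun a b => removableB h a b = true) (d :: r3) :=
        (List.isChain_cons_cons.mp hch2).2
      have hIH := ih (2 * t.length + (d :: r3).length)
        (by simp at hN ⊢; omega) t (d :: r3) le_rfl (by simp) hch3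
      have hL : passL h ((a :: b :: d :: r3) ++ t) = passL h ((d :: r3) ++ t) := by
        simp [passL, hab]
      rw [hL, hIH]
      have hgnn := glue_ne_nil h t (d :: r3)
      obtain ⟨g0, gs, hg⟩ : ∃ g0 gs, glue h (d :: r3) t = g0 :: gs := by
        cases hgl : glue h (d :: r3) t with
        | nil => exact absurd hgl hgnn
        | cons x xs => exact ⟨x, xs, rfl⟩
      have hg0ne : g0 ≠ [] := glue_forall_ne h t (d :: r3) (by simp) g0 (by rw [hg]; simp)
      have hgr : glue h (a :: b :: d :: r3) t = ([a, b] ++ g0) :: gs := by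
        rw [show (a :: b :: d :: r3) = [a, b] ++ (d :: r3) from rfl,
          glue_prefix h t [a, b] (d :: r3) (by simp), hg]
        rfl
      simp only [outG, hg, hgr, List.filter_cons, par2 g0 [a, b] rfl]
      split
      · simp only [List.map_cons]
        rw [show (([a, b] ++ g0) : List Char) = a :: b :: g0 from rfl] at *
        rw [show PySem.List.pyGetD (a :: b :: g0) (-1) ' ' = PySem.List.pyGetD g0 (-1) ' '
          from last2 g0 [a, b] hg0ne]
      · rfl

theorem pass_out (h : Bool) (c : Char) (t : List Char) :
    passL h (c :: t) = outG h [c] t := by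
  have := keyB h (2 * t.length + 1) t [c] le_rfl (by simp) (List.IsChain.singleton c)
  simpa using this

theorem singletons_out :
    ∀ (runs : List (List Char)), (∀ x ∈ runs, x.length = 1) →
      (runs.filter (fun r => r.length % 2 == 1)).map (fun r => PySem.List.pyGetD r (-1) ' ') =
        runs.flatten := by
  intro runs
  induction runs with
  | nil => simp
  | cons r rs ih =>
    intro h1
    obtain ⟨x, rfl⟩ := List.length_eq_one_iff.mp (h1 r (by simp))
    have hx : PySem.List.pyGetD [x] (-1) ' ' = x := by
      rw [PySem.List.pyGetD_neg_one [x] ' ' (by simp)]; rfl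
    simp [hx, ih (fun y hy => h1 y (by simp [hy]))]

theorem cond_iff (h : Bool) (c : Char) (t : List Char) :
    ((glue h [c] t).all (fun r => r.length == 1) = true) ↔ passL h (c :: t) = c :: t := by
  constructor
  · intro hall
    have h1 : ∀ x ∈ glue h [c] t, x.length = 1 := by
      intro x hx; simpa using List.all_eq_true.mp hall x hx
    rw [pass_out h c t]
    show outG h [c] t = c :: t
    unfold outG
    rw [singletons_out _ h1, glue_flatten]
    rfl
  · intro hpass
    by_contra hall
    have hex : ∃ x ∈ glue h [c] t, x.length ≠ 1 := by
      simpa [List.all_eq_true] using hall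
    have hlt := (count_le (fun r => PySem.List.pyGetD r (-1) ' ') _
      (glue_forall_ne h t [c] (by simp))).2 hex
    rw [glue_flatten] at hlt
    have hlt2 : (passL h (c :: t)).length < (c :: t).length := by
      rw [pass_out h c t]; simpa [outG] using hlt
    rw [hpass] at hlt2
    exact absurd hlt2 (lt_irrefl _)

theorem B_step (h : Bool) (s : List Char) :
    loopB h s = if passL h s = s then s else loopB h (passL h s) := by
  cases s with
  | nil => rw [loopB]; simp [passL]
  | cons c t =>
    rw [loopB, runs_eq]
    by_cases hc : passL h (c :: t) = c :: t
    · rw [if_pos ((cond_iff h c t).mpr hc), if_pos hc]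
    · rw [if_neg (fun hall => hc ((cond_iff h c t).mp hall)), if_neg hc, pass_out h c t]
      rfl

theorem len_passL_le (h : Bool) : ∀ (l : List Char), (passL h l).length ≤ l.length := by
  have gen : ∀ (N : Nat) (l : List Char), l.length ≤ N → (passL h l).length ≤ l.length := by
    intro N
    induction N with
    | zero => intro l hl; rw [List.length_eq_zero_iff.mp (Nat.le_zero.mp hl)]; simp [passL]
    | succ N ihN =>
      intro l hl
      match l with
      | [] => simp [passL]
      | [a] => simp [passL]
      | a :: b :: t =>
        by_cases hab : removableB h a b = true
        · have := ihN t (by simp at hl ⊢; omega)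
          simp only [passL, hab, if_true]
          simp at hl ⊢; omega
        · have := ihN (b :: t) (by simp at hl ⊢; omega)
          simp only [passL, hab]
          simp at this ⊢; omega
  exact fun l => gen l.length l le_rfl

theorem rmv_nil_iff (h : Bool) : ∀ (l : List Char), rmvA h l = [] ↔ passL h l = l := by
  have gen : ∀ (N : Nat) (l : List Char), l.length ≤ N → (rmvA h l = [] ↔ passL h l = l) := by
    intro N
    induction N with
    | zero => intro l hl; rw [List.length_eq_zero_iff.mp (Nat.le_zero.mp hl)]; simp [passL, rmvA]
    | succ N ihN =>
      intro l hl
      match l with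
      | [] => simp [passL, rmvA]
      | [a] => simp [passL, rmvA]
      | a :: b :: t =>
        by_cases hab : removableB h a b = true
        · simp only [rmvA, passL, hab, if_true]
          constructor
          · intro hc; exact absurd hc (by simp)
          · intro hc
            have h1 := len_passL_le h t
            have : (passL h t).length = (a :: b :: t).length := by rw [hc]
            simp at this; omega
        · simp only [rmvA, passL, hab, Bool.false_eq_true, if_false]
          have := ihN (b :: t) (by simp at hl ⊢; omega)
          simp [this]
  exact fun l => gen l.length l le_rfl

theorem passL_lt (h : Bool) (l : List Char) (hne : passL h l ≠ l) :
    (passL h l).length < l.length := by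
  cases l with
  | nil => simp [passL] at hne
  | cons c t =>
    have hall : ¬ ((glue h [c] t).all (fun r => r.length == 1) = true) :=
      fun hl => hne ((cond_iff h c t).mp hl)
    have hex : ∃ x ∈ glue h [c] t, x.length ≠ 1 := by
      simpa [List.all_eq_true] using hall
    have hlt := (count_le (fun r => PySem.List.pyGetD r (-1) ' ') _
      (glue_forall_ne h t [c] (by simp))).2 hex
    rw [glue_flatten] at hlt
    rw [pass_out h c t]
    simpa [outG] using hlt

theorem final (h : Bool) :
    ∀ (N : Nat) (line : String), line.toList.length ≤ N →
      reduce_line line h = String.ofList (loopB h line.toList) := by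
  intro N
  induction N with
  | zero =>
    intro line hl
    have hnil : line.toList = [] := List.length_eq_zero_iff.mp (Nat.le_zero.mp hl)
    have hc : passL h line.toList = line.toList := by rw [hnil]; simp [passL]
    rw [A_step, B_step, if_pos ((rmv_nil_iff h _).mpr hc), if_pos hc, String.ofList_toList]
  | succ N ihN =>
    intro line hl
    rw [A_step, B_step]
    by_cases hc : passL h line.toList = line.toList
    · rw [if_pos ((rmv_nil_iff h _).mpr hc), if_pos hc, String.ofList_toList]
    · rw [if_neg (fun he => hc ((rmv_nil_iff h _).mp he)), if_neg hc]
      have hlt := passL_lt h line.toList hc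
      rw [ihN (String.ofList (passL h line.toList)) (by rw [String.toList_ofList]; omega)]
      rw [String.toList_ofList]

-- ===== VERDICT (by name: the statement is the Claim_ definition above) =====
theorem reduce_line_spec : Claim_equal_reduce_line := by
  intro line use_hyphen _
  unfold Spec_reduce_line reduce_line_alt
  exact final use_hyphen line.toList.length line le_rfl
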